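-- pv_equiv track=rewrite | github.com/yaggul/Programming0 | week4/8-Pair-With-Prime-Sum/prime_pair.py | prime_pair
-- ===== SOURCE A (Python) =====
-- def is_prime(n):
--     m=n-1
--     while m>1:
--         if n%m==0:
--             return False
--         m-=1
--     return True
--
-- def prime_pair(items):
--     cnum=0
--     nums=[]
--     for i in range(len(items)):
--         for j in range(i,len(items)):
--             check=items[i]+items[j]
--             if is_prime(check)==True:
--                 return True
--             else:
--                 pass
--     return False
-- ===== SOURCE B (Python) =====
-- def _is_prime(n):
--     # trial division up to sqrt(n); True for n <= 3 (matching A's n <= 1 behaviour too)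
--     d = 2
--     while d * d <= n:
--         if n % d == 0:
--             return False
--         d += 1
--     return True
--
--
-- def prime_pair(items):
--     vals = set(items)
--     return any(_is_prime(a + b) for a in vals for b in vals)
-- ===== Notes on version B (the rewrite author's own statement) =====
-- stated objective: alternative
-- what changed: B deduplicates the items into a set and tests each sum of a pair of distinct values once, with a primality test that trial-divides upward only to sqrt(n) instead of downward through every integer from n-1 to 2.
import Mathlib
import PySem

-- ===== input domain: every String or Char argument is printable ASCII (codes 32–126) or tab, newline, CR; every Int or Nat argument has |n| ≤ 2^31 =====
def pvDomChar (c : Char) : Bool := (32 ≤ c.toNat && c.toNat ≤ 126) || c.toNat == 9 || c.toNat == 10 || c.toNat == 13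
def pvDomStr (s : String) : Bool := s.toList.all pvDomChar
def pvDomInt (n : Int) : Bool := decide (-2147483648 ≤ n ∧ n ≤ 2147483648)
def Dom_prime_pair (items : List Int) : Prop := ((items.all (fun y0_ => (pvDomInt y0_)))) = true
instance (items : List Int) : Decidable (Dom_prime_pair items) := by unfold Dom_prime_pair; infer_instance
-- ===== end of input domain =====

-- B dedups the items with a set and trial-divides each pair sum only up to its square root
-- (A divides downward from n-1): a different decomposition of the same Boolean.

-- ===== PORT A =====
-- is_prime: m = n-1; while m > 1: if n % m == 0: return False; m -= 1; return True
def isPrimeLoopA (n m : Int) : Bool :=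
  if 1 < m then
    if PySem.Int.mod n m == 0 then false
    else isPrimeLoopA n (m - 1)
  else true
termination_by m.toNat
decreasing_by omega

def is_prime_A (n : Int) : Bool := isPrimeLoopA n (n - 1)

-- inner loop: for j in range(i, len(items)): check = items[i]+items[j]; if is_prime(check): return True
def pairLoopJ (items : List Int) (i j : Nat) : Bool :=
  if j < items.length then
    if is_prime_A (PySem.List.pyGetD items (i : Int) 0 + PySem.List.pyGetD items (j : Int) 0) then true
    else pairLoopJ items i (j + 1)
  else false
termination_by items.length - j

-- outer loop: for i in range(len(items)): <inner loop>
def pairLoopI (items : List Int) (i : Nat) : Bool :=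
  if i < items.length then
    if pairLoopJ items i i then true else pairLoopI items (i + 1)
  else false
termination_by items.length - i

def prime_pair (items : List Int) : Bool := pairLoopI items 0

-- ===== PORT B =====
-- _is_prime: d = 2; while d*d <= n: if n % d == 0: return False; d += 1; return True
def altPrimeLoop (n : Int) (d : Nat) : Bool :=
  if (d : Int) * (d : Int) ≤ n then
    if PySem.Int.mod n (d : Int) == 0 then false
    else altPrimeLoop n (d + 1)
  else true
termination_by n.toNat + 1 - d
decreasing_by
  rename_i h
  have hd : (d : Int) ≤ n := by nlinarith [Int.natCast_nonneg d, h]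
  omega

def is_prime_alt (n : Int) : Bool := altPrimeLoop n 2

-- vals = set(items); return any(_is_prime(a+b) for a in vals for b in vals)
def prime_pair_alt (items : List Int) : Bool :=
  let vals := PySem.Set.ofList items
  vals.any (fun a => vals.any (fun b => is_prime_alt (a + b)))

-- ===== PRECONDITION & SPEC =====
def Spec_prime_pair (items : List Int) (out : Bool) : Prop := out = prime_pair_alt items
instance (items : List Int) (out : Bool) : Decidable (Spec_prime_pair items out) := by unfold Spec_prime_pair; infer_instance

-- ===== CLAIM (what is proved, stated in full; the proofs are below) =====
def Claim_equal_prime_pair : Prop := ∀ (items : List Int), Dom_prime_pair items → Spec_prime_pair items (prime_pair items)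

-- ===== LEMMAS AND PROOFS =====

-- A's divisor loop fails iff some divisor lies in (1, m]
theorem isPrimeLoopA_false_iff (n m : Int) :
    isPrimeLoopA n m = false ↔ ∃ k : Int, 1 < k ∧ k ≤ m ∧ k ∣ n := by
  induction m using isPrimeLoopA.induct (n := n) with
  | case1 m hm hmod =>
    rw [isPrimeLoopA, if_pos hm, if_pos hmod]
    rw [beq_iff_eq, PySem.Int.mod_eq_zero_iff_dvd] at hmod
    exact iff_of_true rfl ⟨m, hm, le_refl _, hmod⟩
  | case2 m hm hmod ih =>
    rw [isPrimeLoopA, if_pos hm, if_neg hmod, ih]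
    rw [show ¬(PySem.Int.mod n m == 0) = true ↔ ¬ m ∣ n by
          rw [beq_iff_eq, PySem.Int.mod_eq_zero_iff_dvd]] at hmod
    constructor
    · rintro ⟨k, h1, h2, h3⟩; exact ⟨k, h1, by omega, h3⟩
    · rintro ⟨k, h1, h2, h3⟩
      refine ⟨k, h1, ?_, h3⟩
      rcases eq_or_lt_of_le h2 with h | h
      · exact absurd (h ▸ h3) hmod
      · omega
  | case3 m hm =>
    rw [isPrimeLoopA, if_neg hm]
    exact iff_of_false (by simp) (by rintro ⟨k, h1, h2, _⟩; omega)

-- B's divisor loop fails iff some divisor k ≥ d has k*k ≤ n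
theorem altPrimeLoop_false_iff (n : Int) (d : Nat) :
    altPrimeLoop n d = false ↔
      ∃ k : Nat, d ≤ k ∧ (k : Int) * (k : Int) ≤ n ∧ (k : Int) ∣ n := by
  induction d using altPrimeLoop.induct (n := n) with
  | case1 d hle hmod =>
    rw [altPrimeLoop, if_pos hle, if_pos hmod]
    rw [beq_iff_eq, PySem.Int.mod_eq_zero_iff_dvd] at hmod
    exact iff_of_true rfl ⟨d, le_refl _, hle, hmod⟩
  | case2 d hle hmod ih =>
    rw [altPrimeLoop, if_pos hle, if_neg hmod, ih]
    rw [show ¬(PySem.Int.mod n (d : Int) == 0) = true ↔ ¬ (d : Int) ∣ n by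
          rw [beq_iff_eq, PySem.Int.mod_eq_zero_iff_dvd]] at hmod
    constructor
    · rintro ⟨k, h1, h2, h3⟩; exact ⟨k, by omega, h2, h3⟩
    · rintro ⟨k, h1, h2, h3⟩
      refine ⟨k, ?_, h2, h3⟩
      rcases eq_or_lt_of_le h1 with h | h
      · exact absurd (h ▸ h3) hmod
      · omega
  | case3 d hle =>
    rw [altPrimeLoop, if_neg hle]
    refine iff_of_false (by simp) ?_
    rintro ⟨k, h1, h2, _⟩
    apply hle
    have hdk : (d : Int) ≤ (k : Int) := by exact_mod_cast h1
    nlinarith [Int.natCast_nonneg d]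

-- the two primality tests agree on every integer
theorem is_prime_eq (n : Int) : is_prime_A n = is_prime_alt n := by
  have hA := isPrimeLoopA_false_iff n (n - 1)
  have hB := altPrimeLoop_false_iff n 2
  rcases hbA : is_prime_A n with _ | _ <;> rcases hbB : is_prime_alt n with _ | _
  · rfl
  · -- A found a divisor k with 1 < k ≤ n-1; build one with square ≤ n
    exfalso
    obtain ⟨k, hk1, hk2, hk3⟩ := hA.mp hbA
    obtain ⟨q, hq⟩ := hk3
    have hn3 : 3 ≤ n := by omega
    have hq1 : 1 ≤ q := by nlinarith
    have hq2 : 2 ≤ q := by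
      rcases eq_or_lt_of_le hq1 with h | h
      · exfalso; rw [← h, mul_one] at hq; omega
      · omega
    have hfalse : is_prime_alt n = false := by
      rw [is_prime_alt, hB]
      by_cases hsq : k * k ≤ n
      · refine ⟨k.toNat, by omega, ?_, ?_⟩
        · rw [Int.toNat_of_nonneg (by omega)]; exact hsq
        · rw [Int.toNat_of_nonneg (by omega)]; exact ⟨q, hq⟩
      · refine ⟨q.toNat, by omega, ?_, ?_⟩
        · rw [Int.toNat_of_nonneg (by omega)]; nlinarith
        · rw [Int.toNat_of_nonneg (by omega)]; exact ⟨k, by linarith [hq, mul_comm k q]⟩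
    rw [hbB] at hfalse; exact absurd hfalse (by simp)
  · -- B found a divisor k ≥ 2 with k*k ≤ n; then 1 < k ≤ n-1
    exfalso
    obtain ⟨k, hk1, hk2, hk3⟩ := hB.mp hbB
    have hk1' : (2 : Int) ≤ (k : Int) := by exact_mod_cast hk1
    have hfalse : is_prime_A n = false := by
      rw [is_prime_A, hA]
      exact ⟨(k : Int), by omega, by nlinarith, hk3⟩
    rw [hbA] at hfalse; exact absurd hfalse (by simp)
  · rfl

-- inner loop: true iff some index k ∈ [j, len) gives a "prime" sum with index i
theorem pairLoopJ_true_iff (items : List Int) (i j : Nat) :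
    pairLoopJ items i j = true ↔
      ∃ k : Nat, j ≤ k ∧ k < items.length ∧
        is_prime_A (items.getD i 0 + items.getD k 0) = true := by
  induction j using pairLoopJ.induct (items := items) (i := i) with
  | case1 j hj hp =>
    rw [pairLoopJ, if_pos hj, if_pos hp]
    simp only [PySem.List.pyGetD_natCast] at hp
    exact iff_of_true rfl ⟨j, le_refl _, hj, hp⟩
  | case2 j hj hp ih =>
    rw [pairLoopJ, if_pos hj, if_neg hp, ih]
    simp only [PySem.List.pyGetD_natCast] at hp
    constructor
    · rintro ⟨k, h1, h2, h3⟩; exact ⟨k, by omega, h2, h3⟩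
    · rintro ⟨k, h1, h2, h3⟩
      refine ⟨k, ?_, h2, h3⟩
      rcases eq_or_lt_of_le h1 with h | h
      · exact absurd (h ▸ h3) hp
      · omega
  | case3 j hj =>
    rw [pairLoopJ, if_neg hj]
    exact iff_of_false (by simp) (by rintro ⟨k, h1, h2, _⟩; omega)

-- outer loop: true iff some index pair a ≤ b, both ≥ i, gives a "prime" sum
theorem pairLoopI_true_iff (items : List Int) (i : Nat) :
    pairLoopI items i = true ↔
      ∃ a b : Nat, i ≤ a ∧ a ≤ b ∧ b < items.length ∧
        is_prime_A (items.getD a 0 + items.getD b 0) = true := by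
  induction i using pairLoopI.induct (items := items) with
  | case1 i hi hin =>
    rw [pairLoopI, if_pos hi, if_pos hin]
    obtain ⟨k, h1, h2, h3⟩ := (pairLoopJ_true_iff items i i).mp hin
    exact iff_of_true rfl ⟨i, k, le_refl _, h1, h2, h3⟩
  | case2 i hi hin ih =>
    rw [pairLoopI, if_pos hi, if_neg hin, ih]
    constructor
    · rintro ⟨a, b, h1, h2, h3, h4⟩; exact ⟨a, b, by omega, h2, h3, h4⟩
    · rintro ⟨a, b, h1, h2, h3, h4⟩
      refine ⟨a, b, ?_, h2, h3, h4⟩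
      rcases eq_or_lt_of_le h1 with h | h
      · exfalso
        exact hin ((pairLoopJ_true_iff items i i).mpr ⟨b, by omega, h3, by rw [h]; exact h4⟩)
      · omega
  | case3 i hi =>
    rw [pairLoopI, if_neg hi]
    exact iff_of_false (by simp) (by rintro ⟨a, b, h1, h2, h3, _⟩; omega)

-- A is true iff some pair of elements of the list has a "prime" sum
theorem prime_pair_true_iff (items : List Int) :
    prime_pair items = true ↔
      ∃ x ∈ items, ∃ y ∈ items, is_prime_A (x + y) = true := by
  rw [prime_pair, pairLoopI_true_iff]
  constructor
  · rintro ⟨a, b, _, hab, hb, hp⟩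
    have ha : a < items.length := by omega
    refine ⟨items.getD a 0, ?_, items.getD b 0, ?_, hp⟩
    · rw [List.getD_eq_getElem items 0 ha]; exact List.getElem_mem ha
    · rw [List.getD_eq_getElem items 0 hb]; exact List.getElem_mem hb
  · rintro ⟨x, hx, y, hy, hp⟩
    obtain ⟨p, hp1, hp2⟩ := List.mem_iff_getElem.mp hx
    obtain ⟨q, hq1, hq2⟩ := List.mem_iff_getElem.mp hy
    rcases le_total p q with h | h
    · exact ⟨p, q, by omega, h, hq1,
        by rw [List.getD_eq_getElem items 0 hp1, List.getD_eq_getElem items 0 hq1, hp2, hq2]; exact hp⟩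
    · exact ⟨q, p, by omega, h, hp1,
        by rw [List.getD_eq_getElem items 0 hq1, List.getD_eq_getElem items 0 hp1, hp2, hq2,
               add_comm]; exact hp⟩

-- B is true iff some pair of elements of the list has a "prime" sum
theorem prime_pair_alt_true_iff (items : List Int) :
    prime_pair_alt items = true ↔
      ∃ x ∈ items, ∃ y ∈ items, is_prime_alt (x + y) = true := by
  simp only [prime_pair_alt, List.any_eq_true]
  constructor
  · rintro ⟨x, hx, y, hy, hp⟩
    exact ⟨x, (PySem.Set.mem_ofList items x).mp hx, y, (PySem.Set.mem_ofList items y).mp hy, hp⟩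
  · rintro ⟨x, hx, y, hy, hp⟩
    exact ⟨x, (PySem.Set.mem_ofList items x).mpr hx, y, (PySem.Set.mem_ofList items y).mpr hy, hp⟩

-- ===== VERDICT (by name: the statement is the Claim_ definition above) =====
theorem prime_pair_spec : Claim_equal_prime_pair := by
  intro items _
  show prime_pair items = prime_pair_alt items
  rw [Bool.eq_iff_iff, prime_pair_true_iff, prime_pair_alt_true_iff]
  simp only [is_prime_eq]
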